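-- pv_equiv track=rewrite | github.com/lyubogankov/adventofcode2022 | day06/solution.py | process_datastream_and_find_first_n_consecutive_unique_characters
-- ===== SOURCE A (Python) =====
-- from collections import deque
--
-- def process_datastream_and_find_first_n_consecutive_unique_characters(datastream, n):
--     last_n_chars = deque(maxlen=n)
--     index = 0
--     for char in datastream:
--         index += 1
--         last_n_chars.append(char)
--         if len(last_n_chars) < n:
--             continue
--         if len(set(last_n_chars)) == n:
--             return index
-- ===== SOURCE B (Python) =====
-- def process_datastream_and_find_first_n_consecutive_unique_characters(datastream, n):
--     counts = {}
--     distinct = 0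
--     for i, ch in enumerate(datastream):
--         counts[ch] = counts.get(ch, 0) + 1
--         if counts[ch] == 1:
--             distinct += 1
--         if i >= n:
--             old = datastream[i - n]
--             counts[old] = counts[old] - 1
--             if counts[old] == 0:
--                 distinct -= 1
--         if i + 1 >= n and distinct == n:
--             return i + 1
--     return None
-- ===== Notes on version B (the rewrite author's own statement) =====
-- stated objective: faster
-- what changed: A rebuilds a set() of the whole n-char deque at every position; B makes one sliding-window pass keeping a per-character count dict and a running distinct counter updated in O(1) per step.
-- outside the precondition, e.g. on process_datastream_and_find_first_n_consecutive_unique_characters('ab', -1): A raises ValueError, B raises KeyError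
import Mathlib
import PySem

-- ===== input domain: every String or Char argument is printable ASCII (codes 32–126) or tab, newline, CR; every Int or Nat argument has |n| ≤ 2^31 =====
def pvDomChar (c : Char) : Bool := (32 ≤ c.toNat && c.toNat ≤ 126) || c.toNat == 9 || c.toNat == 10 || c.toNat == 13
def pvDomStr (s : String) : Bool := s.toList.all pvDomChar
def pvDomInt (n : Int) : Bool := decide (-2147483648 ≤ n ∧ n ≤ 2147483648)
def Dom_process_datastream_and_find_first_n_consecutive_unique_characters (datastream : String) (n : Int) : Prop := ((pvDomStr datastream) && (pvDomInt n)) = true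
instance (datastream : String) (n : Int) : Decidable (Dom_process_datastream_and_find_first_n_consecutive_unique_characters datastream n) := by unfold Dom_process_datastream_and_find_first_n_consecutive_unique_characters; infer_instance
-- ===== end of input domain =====

-- B replaces A's per-step set() rebuild over the deque by a single sliding-window pass with an
-- incrementally maintained character-count dict and distinct counter (objective: faster, O(len·n) → O(len)).

-- ===== PORT A =====
-- deque(maxlen=n).append c for 0 ≤ n: drop the front element when the window overflows
def pvDequeAppend (dq : List Char) (c : Char) (n : Int) : List Char :=
  let d := dq ++ [c]
  if (d.length : Int) > n then d.tail else d

def pvALoop (n : Int) : List Char → List Char → Int → Option Int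
  | [], _, _ => none
  | c :: rest, dq, index =>
      let index := index + 1
      let dq := pvDequeAppend dq c n
      if (dq.length : Int) < n then pvALoop n rest dq index
      else if ((PySem.Set.ofList dq).length : Int) = n then some index
      else pvALoop n rest dq index

def process_datastream_and_find_first_n_consecutive_unique_characters (datastream : String) (n : Int) : Option Int :=
  pvALoop n datastream.toList [] 0

-- ===== PORT B =====
-- loop over 'enumerate(datastream)': i is the 0-based position, counts/distinct the window state
def pvBLoop (s : List Char) (n : Int) : List Char → Nat → PySem.Dict Char Int → Int → Option Int
  | [], _, _, _ => none
  | c :: rest, i, counts0, distinct0 =>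
      let counts1 := counts0.insert c (counts0.getD c 0 + 1)
      let distinct1 := if counts1.getD c 0 = 1 then distinct0 + 1 else distinct0
      let st :=
        if (i : Int) ≥ n then
          -- datastream[i - n]; in range on every admitted input (0 ≤ n ≤ i < len), so exact
          let old := PySem.List.pyGetD s ((i : Int) - n) ' '
          let counts2 := counts1.insert old (counts1.getD old 0 - 1)
          let distinct2 := if counts2.getD old 0 = 0 then distinct1 - 1 else distinct1
          (counts2, distinct2)
        else (counts1, distinct1)
      if (i : Int) + 1 ≥ n ∧ st.2 = n then some ((i : Int) + 1)
      else pvBLoop s n rest (i + 1) st.1 st.2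

def process_datastream_and_find_first_n_consecutive_unique_characters_alt (datastream : String) (n : Int) : Option Int :=
  pvBLoop datastream.toList n datastream.toList 0 PySem.Dict.empty 0

-- ===== PRECONDITION & SPEC =====
-- A raises ValueError (deque(maxlen=n) with negative maxlen) for n < 0; Pre_ excludes exactly those inputs.
def Pre_process_datastream_and_find_first_n_consecutive_unique_characters (datastream : String) (n : Int) : Prop := 0 ≤ n
instance (datastream : String) (n : Int) : Decidable (Pre_process_datastream_and_find_first_n_consecutive_unique_characters datastream n) := by unfold Pre_process_datastream_and_find_first_n_consecutive_unique_characters; infer_instance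

def pvWitness_process_datastream_and_find_first_n_consecutive_unique_characters : String × Int := ("mjqjpqmgbljsphdztnvjfqwrcgsmlb", 4)

def Spec_process_datastream_and_find_first_n_consecutive_unique_characters (datastream : String) (n : Int) (out : Option Int) : Prop := out = process_datastream_and_find_first_n_consecutive_unique_characters_alt datastream n
instance (datastream : String) (n : Int) (out : Option Int) : Decidable (Spec_process_datastream_and_find_first_n_consecutive_unique_characters datastream n out) := by unfold Spec_process_datastream_and_find_first_n_consecutive_unique_characters; infer_instance

-- ===== CLAIM (what is proved, stated in full; the proofs are below) =====
def Claim_equal_process_datastream_and_find_first_n_consecutive_unique_characters : Prop := ∀ (datastream : String) (n : Int), Dom_process_datastream_and_find_first_n_consecutive_unique_characters datastream n → Pre_process_datastream_and_find_first_n_consecutive_unique_characters datastream n → Spec_process_datastream_and_find_first_n_consecutive_unique_characters datastream n (process_datastream_and_find_first_n_consecutive_unique_characters datastream n)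

-- ===== LEMMAS AND PROOFS =====

-- the number of distinct elements of a list, as A's set() sees it, is its toFinset card
lemma pvSetOfListLength (xs : List Char) : (PySem.Set.ofList xs).length = xs.toFinset.card := by
  have hnd : (PySem.Set.ofList xs).Nodup := PySem.Set.nodup_ofList xs
  have hmem : ∀ y, y ∈ PySem.Set.ofList xs ↔ y ∈ xs := fun y => PySem.Set.mem_ofList xs y
  have : (PySem.Set.ofList xs).toFinset = xs.toFinset := by
    ext y; simp [hmem y]
  rw [← List.toFinset_card_of_nodup hnd, this]

-- appending one char to a window: distinct count grows iff the char is new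
lemma pvCardAppend (xs : List Char) (c : Char) :
    ((xs ++ [c]).toFinset.card : Int) = (xs.toFinset.card : Int) + (if c ∈ xs then 0 else 1) := by
  by_cases h : c ∈ xs
  · simp [h, Finset.insert_eq_self.mpr (List.mem_toFinset.mpr h)]
  · simp [h, Finset.card_insert_of_notMem (fun hc => h (List.mem_toFinset.mp hc))]

-- dropping the front char: distinct count shrinks iff its count drops to zero
lemma pvCardCons (c : Char) (xs : List Char) :
    ((c :: xs).toFinset.card : Int) = (xs.toFinset.card : Int) + (if c ∈ xs then 0 else 1) := by
  by_cases h : c ∈ xs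
  · simp [h, Finset.insert_eq_self.mpr (List.mem_toFinset.mpr h)]
  · simp [h, Finset.card_insert_of_notMem (fun hc => h (List.mem_toFinset.mp hc))]

-- the coupling invariant: A's (deque, index) state and B's (counts, distinct, i) state describe
-- the same sliding window (the last min(i, n) of the first i characters), hence the loops agree
lemma pvLoopEq (s : List Char) (n : Int) (hn : 0 ≤ n) :
    ∀ (rest : List Char) (i : Nat) (dq : List Char) (counts : PySem.Dict Char Int) (distinct : Int),
      rest = s.drop i →
      dq = (s.take i).drop (i - n.toNat) →
      (∀ ch, counts.getD ch 0 = (dq.count ch : Int)) →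
      distinct = (dq.toFinset.card : Int) →
      pvALoop n rest dq (i : Int) = pvBLoop s n rest i counts distinct := by
  intro rest
  induction rest with
  | nil => intro i dq counts distinct _ _ _ _; simp [pvALoop, pvBLoop]
  | cons c rest ih =>
    intro i dq counts distinct hrest hdq hcnt hdist
    have hn'cast : ((n.toNat : Nat) : Int) = n := Int.toNat_of_nonneg hn
    have hilt : i < s.length := by
      by_contra h
      rw [List.drop_eq_nil_of_le (by omega)] at hrest
      exact absurd hrest (by simp)
    have hdropi := List.drop_eq_getElem_cons hilt
    rw [hdropi] at hrest
    injection hrest with hc_eq hrest'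
    have htake : (s.take i).length = i := by simp; omega
    have hdqlen : dq.length = i - (i - n.toNat) := by
      rw [hdq, List.length_drop, htake]
    have hwin : dq ++ [c] = (s.take (i + 1)).drop (i - n.toNat) := by
      rw [List.take_add_one, List.getElem?_eq_getElem hilt,
        List.drop_append_of_le_length (by omega), ← hdq, hc_eq]
      simp
    -- the state after the two append-side updates of B
    have hcnt1 : ∀ ch, (counts.insert c (counts.getD c 0 + 1)).getD ch 0 = ((dq ++ [c]).count ch : Int) := by
      intro ch
      rw [PySem.Dict.getD_insert]
      by_cases h : ch = c
      · subst h; rw [hcnt]; simp [List.count_append]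
      · rw [if_neg h, hcnt]
        simp [List.count_append, List.count_singleton]
        exact fun hcc => h hcc.symm
    have hd1 : (if (counts.insert c (counts.getD c 0 + 1)).getD c 0 = 1 then distinct + 1 else distinct)
        = (((dq ++ [c]).toFinset.card : Nat) : Int) := by
      have hcc : (counts.insert c (counts.getD c 0 + 1)).getD c 0 = (dq.count c : Int) + 1 := by
        rw [PySem.Dict.getD_insert, if_pos rfl, hcnt]
      rw [pvCardAppend]
      by_cases hm : c ∈ dq
      · have h1 : 1 ≤ dq.count c := List.one_le_count_iff.mpr hm
        rw [if_neg (by rw [hcc]; omega), if_pos hm, hdist, add_zero]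
      · have h0 : dq.count c = 0 := List.count_eq_zero.mpr hm
        rw [if_pos (by rw [hcc, h0]; simp), if_neg hm, hdist]
    by_cases hni : n.toNat ≤ i
    · -- window already full: A drops the deque front, B decrements the outgoing char
      have hold : PySem.List.pyGetD s ((i : Int) - n) ' ' = s[i - n.toNat]'(by omega) := by
        have hidx : (i : Int) - n = ((i - n.toNat : Nat) : Int) := by omega
        rw [hidx, PySem.List.pyGetD_natCast, List.getD_eq_getElem _ _ (by omega)]
      have h1 : i - n.toNat < (s.take (i + 1)).length := by simp; omega
      have hsplit : dq ++ [c] = s[i - n.toNat]'(by omega) :: (s.take (i + 1)).drop (i + 1 - n.toNat) := by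
        rw [hwin, List.drop_eq_getElem_cons h1, List.getElem_take]
        congr 2
        omega
      set old := s[i - n.toNat]'(by omega) with hold_def
      set w := (s.take (i + 1)).drop (i + 1 - n.toNat) with hw_def
      have hwlen : w.length = n.toNat := by
        rw [hw_def, List.length_drop]
        simp
        omega
      have hcnt2 : ∀ ch, ((counts.insert c (counts.getD c 0 + 1)).insert old
          ((counts.insert c (counts.getD c 0 + 1)).getD old 0 - 1)).getD ch 0 = (w.count ch : Int) := by
        intro ch
        rw [PySem.Dict.getD_insert]
        by_cases h : ch = old
        · subst h
          rw [if_pos rfl, hcnt1, hsplit, List.count_cons_self]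
          push_cast; ring
        · rw [if_neg h, hcnt1, hsplit]
          simp [List.count_cons]
          exact fun hcc => h hcc.symm
      have hA : pvALoop n (c :: rest) dq (i : Int) =
          (if ((w.length : Nat) : Int) < n then pvALoop n rest w ((i : Int) + 1)
           else if (((PySem.Set.ofList w).length : Nat) : Int) = n then some ((i : Int) + 1)
           else pvALoop n rest w ((i : Int) + 1)) := by
        have hdq' : pvDequeAppend dq c n = w := by
          rw [pvDequeAppend]
          have hlen : ((dq ++ [c]).length : Int) > n := by
            simp [List.length_append, hdqlen]; omega
          rw [if_pos hlen, hsplit]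
          rfl
        simp only [pvALoop, hdq']
      have hnotlt : ¬ ((w.length : Nat) : Int) < n := by rw [hwlen]; omega
      set d1 := (if (counts.insert c (counts.getD c 0 + 1)).getD c 0 = 1 then distinct + 1 else distinct) with hd1_def
      set cnt2 := ((counts.insert c (counts.getD c 0 + 1)).insert old
          ((counts.insert c (counts.getD c 0 + 1)).getD old 0 - 1)) with hcnt2_def
      set d2 := (if cnt2.getD old 0 = 0 then d1 - 1 else d1) with hd2_def
      have hd2w : d2 = ((w.toFinset.card : Nat) : Int) := by
        have hcold : cnt2.getD old 0 = (w.count old : Int) := hcnt2 old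
        have hd1' : d1 = (((old :: w).toFinset.card : Nat) : Int) := by rw [hd1, hsplit]
        rw [hd2_def, hcold, hd1', pvCardCons]
        by_cases hm : old ∈ w
        · have h1 : 1 ≤ w.count old := List.one_le_count_iff.mpr hm
          rw [if_neg (by omega), if_pos hm, add_zero]
        · have h0 : w.count old = 0 := List.count_eq_zero.mpr hm
          rw [if_pos (by rw [h0]; simp), if_neg hm]
          ring
      have hB : pvBLoop s n (c :: rest) i counts distinct =
          (if ((i : Int) + 1 ≥ n ∧ d2 = n) then some ((i : Int) + 1)
           else pvBLoop s n rest (i + 1) cnt2 d2) := by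
        have hge : (i : Int) ≥ n := by omega
        simp only [pvBLoop]
        rw [if_pos hge, hold]
      rw [hA, hB, if_neg hnotlt]
      have hset : ((((PySem.Set.ofList w).length : Nat) : Int) = n) ↔ ((i : Int) + 1 ≥ n ∧ d2 = n) := by
        rw [pvSetOfListLength, hd2w]
        constructor
        · intro h; exact ⟨by omega, h⟩
        · intro h; exact h.2
      by_cases hret : (((PySem.Set.ofList w).length : Nat) : Int) = n
      · rw [if_pos hret, if_pos (hset.mp hret)]
      · rw [if_neg hret, if_neg (fun h => hret (hset.mpr h))]
        have := ih (i + 1) w cnt2 d2 hrest' (by rw [hw_def]) hcnt2 hd2w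
        push_cast at this
        exact this
    · -- window not yet full: both sides just append c
      have hizero : i - n.toNat = 0 := by omega
      have hwin' : dq ++ [c] = (s.take (i + 1)).drop (i + 1 - n.toNat) := by
        rw [hwin]
        congr 1
        omega
      have hA : pvALoop n (c :: rest) dq (i : Int) =
          (if (((dq ++ [c]).length : Nat) : Int) < n then pvALoop n rest (dq ++ [c]) ((i : Int) + 1)
           else if (((PySem.Set.ofList (dq ++ [c])).length : Nat) : Int) = n then some ((i : Int) + 1)
           else pvALoop n rest (dq ++ [c]) ((i : Int) + 1)) := by
        have hdq' : pvDequeAppend dq c n = dq ++ [c] := by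
          rw [pvDequeAppend]
          have hlen : ¬ (((dq ++ [c]).length : Int) > n) := by
            simp [List.length_append, hdqlen]; omega
          rw [if_neg hlen]
        simp only [pvALoop, hdq']
      set cnt1 := counts.insert c (counts.getD c 0 + 1) with hcnt1_def
      set d1 := (if cnt1.getD c 0 = 1 then distinct + 1 else distinct) with hd1_def
      have hB : pvBLoop s n (c :: rest) i counts distinct =
          (if ((i : Int) + 1 ≥ n ∧ d1 = n) then some ((i : Int) + 1)
           else pvBLoop s n rest (i + 1) cnt1 d1) := by
        simp only [pvBLoop]
        rw [if_neg (show ¬ ((i : Int) ≥ n) by omega)]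
      have hdq1len : (dq ++ [c]).length = i + 1 := by
        simp [hdqlen]; omega
      rw [hA, hB]
      have hrec := ih (i + 1) (dq ++ [c]) cnt1 d1 hrest' hwin' hcnt1 hd1
      push_cast at hrec
      by_cases hlt : (((dq ++ [c]).length : Nat) : Int) < n
      · rw [if_pos hlt, if_neg (by rw [hdq1len] at hlt; push_cast at hlt; omega)]
        exact hrec
      · rw [if_neg hlt]
        have hset : ((((PySem.Set.ofList (dq ++ [c])).length : Nat) : Int) = n) ↔ ((i : Int) + 1 ≥ n ∧ d1 = n) := by
          rw [pvSetOfListLength, hd1]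
          constructor
          · intro h
            refine ⟨?_, h⟩
            rw [hdq1len] at hlt
            push_cast at hlt
            omega
          · intro h; exact h.2
        by_cases hret : (((PySem.Set.ofList (dq ++ [c])).length : Nat) : Int) = n
        · rw [if_pos hret, if_pos (hset.mp hret)]
        · rw [if_neg hret, if_neg (fun h => hret (hset.mpr h))]
          exact hrec

-- ===== VERDICT (by name: the statement is the Claim_ definition above) =====
theorem process_datastream_and_find_first_n_consecutive_unique_characters_spec : Claim_equal_process_datastream_and_find_first_n_consecutive_unique_characters := by
  intro ds n _ hn
  unfold Spec_process_datastream_and_find_first_n_consecutive_unique_characters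
  unfold process_datastream_and_find_first_n_consecutive_unique_characters
  unfold process_datastream_and_find_first_n_consecutive_unique_characters_alt
  exact_mod_cast pvLoopEq ds.toList n hn ds.toList 0 [] PySem.Dict.empty 0 rfl (by simp)
    (fun ch => by simp [PySem.Dict.getD_empty]) (by simp)
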